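-- pv_equiv track=rewrite | github.com/bcao4/CS115 | CS115A copy/loops.py | drop_matches
-- ===== SOURCE A (Python) =====
-- def drop_matches(list1, list2):
--     '''returns a new list that contains only the elements in list2 that are
--     not in list1'''
--     list1.sort()
--     list2.sort()
--     result=[]
--     i = j= 0
--     while i < len(list1) and j < len(list2):
--         if list1[i]==list2[j]:
--             i+=1
--             j+=1
--         elif list1[i]<list2[j]:
--             i+=1
--         else:
--             result.append(list2[j])
--             j+=1
--     while j < len(list2):
--         result.append(list2[j])
--         j+=1
--     return result
-- ===== SOURCE B (Python) =====
-- def drop_matches(list1, list2):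
--     '''returns a new list that contains only the elements in list2 that are
--     not in list1'''
--     list1.sort()
--     list2.sort()
--     counts = {}
--     for x in list1:
--         counts[x] = counts.get(x, 0) + 1
--     result = []
--     for x in list2:
--         if counts.get(x, 0) > 0:
--             counts[x] = counts[x] - 1
--         else:
--             result.append(x)
--     return result
-- ===== Notes on version B (the rewrite author's own statement) =====
-- stated objective: idiomatic
-- what changed: Replaces the two-pointer lockstep merge over both sorted lists with a count table built once from list1 and a single pass over sorted list2 that drops one matched occurrence per counted element.
import Mathlib
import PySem

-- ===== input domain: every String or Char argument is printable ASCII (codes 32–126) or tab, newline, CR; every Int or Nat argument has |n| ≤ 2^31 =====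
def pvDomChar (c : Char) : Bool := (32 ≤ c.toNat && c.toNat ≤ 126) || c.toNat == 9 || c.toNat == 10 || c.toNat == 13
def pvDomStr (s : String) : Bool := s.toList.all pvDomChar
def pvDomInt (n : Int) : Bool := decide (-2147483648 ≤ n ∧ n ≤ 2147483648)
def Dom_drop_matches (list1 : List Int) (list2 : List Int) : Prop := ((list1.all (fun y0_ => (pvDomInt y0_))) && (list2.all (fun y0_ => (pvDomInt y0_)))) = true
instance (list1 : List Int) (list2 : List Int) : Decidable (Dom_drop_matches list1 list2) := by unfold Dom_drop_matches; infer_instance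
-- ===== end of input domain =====

-- B replaces A's two-pointer merge with a count table from list1 plus one pass over
-- sorted list2 (idiomatic; same cost). Both A and B sort the argument lists in place;
-- the equivalence proved here is about the return value.

-- ===== PORT A =====
-- the two while loops of A, on the suffixes of the two sorted lists, with the result accumulator
def dmLoop : List Int → List Int → List Int → List Int
  | a :: as, b :: bs, res =>
      if a = b then dmLoop as bs res
      else if a < b then dmLoop as (b :: bs) res
      else dmLoop (a :: as) bs (res ++ [b])
  | [], bs, res => res ++ bs          -- first loop exits with i = len(list1); second loop drains list2
  | _ :: _, [], res => res
termination_by l1 l2 _ => l1.length + l2.length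

def drop_matches (list1 : List Int) (list2 : List Int) : List Int :=
  dmLoop (PySem.List.sorted list1 (fun x => x) false) (PySem.List.sorted list2 (fun x => x) false) []

-- ===== PORT B =====
-- B's second loop: one pass over sorted list2 against the count dict
def dmAltLoop : PySem.Dict Int Int → List Int → List Int → List Int
  | _, [], res => res
  | d, b :: bs, res =>
      if d.getD b 0 > 0 then dmAltLoop (d.insert b (d.getD b 0 - 1)) bs res
      else dmAltLoop d bs (res ++ [b])

def drop_matches_alt (list1 : List Int) (list2 : List Int) : List Int :=
  let s1 := PySem.List.sorted list1 (fun x => x) false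
  let s2 := PySem.List.sorted list2 (fun x => x) false
  let counts := s1.foldl (fun d x => d.insert x (d.getD x 0 + 1)) PySem.Dict.empty
  dmAltLoop counts s2 []

-- ===== PRECONDITION & SPEC =====
def Spec_drop_matches (list1 : List Int) (list2 : List Int) (out : List Int) : Prop := out = drop_matches_alt list1 list2
instance (list1 : List Int) (list2 : List Int) (out : List Int) : Decidable (Spec_drop_matches list1 list2 out) := by unfold Spec_drop_matches; infer_instance

-- ===== CLAIM (what is proved, stated in full; the proofs are below) =====
def Claim_equal_drop_matches : Prop := ∀ (list1 : List Int) (list2 : List Int), Dom_drop_matches list1 list2 → Spec_drop_matches list1 list2 (drop_matches list1 list2)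

-- ===== LEMMAS AND PROOFS =====

-- abstract version of B's loop, over a count function
def fLoop (f : Int → Int) : List Int → List Int → List Int
  | [], res => res
  | b :: bs, res =>
      if f b > 0 then fLoop (fun x => if x = b then f b - 1 else f x) bs res
      else fLoop f bs (res ++ [b])

theorem dmAltLoop_eq_fLoop (d : PySem.Dict Int Int) (l res : List Int) :
    dmAltLoop d l res = fLoop (fun x => d.getD x 0) l res := by
  induction l generalizing d res with
  | nil => rfl
  | cons b bs ih =>
      simp only [dmAltLoop, fLoop]
      split_ifs with h
      · rw [ih]
        congr 1
        funext x
        rw [PySem.Dict.getD_insert]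
      · exact ih d (res ++ [b])

theorem fLoop_congr (f g : Int → Int) (l res : List Int)
    (h : ∀ x ∈ l, f x = g x) : fLoop f l res = fLoop g l res := by
  induction l generalizing f g res with
  | nil => rfl
  | cons b bs ih =>
      simp only [fLoop]
      rw [h b (by simp)]
      split_ifs with hb
      · refine ih _ _ _ (fun x hx => ?_)
        by_cases hxb : x = b <;> simp [hxb, h x (by simp [hx])]
      · exact ih f g (res ++ [b]) (fun x hx => h x (by simp [hx]))

theorem fLoop_of_nonpos (f : Int → Int) (l res : List Int)
    (h : ∀ x ∈ l, f x ≤ 0) : fLoop f l res = res ++ l := by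
  induction l generalizing res with
  | nil => simp [fLoop]
  | cons b bs ih =>
      simp only [fLoop]
      rw [if_neg (by have := h b (by simp); omega)]
      rw [ih (res ++ [b]) (fun x hx => h x (List.mem_cons_of_mem _ hx))]
      simp

theorem dmLoop_eq_fLoop (s1 s2 res : List Int)
    (h1 : s1.Pairwise (· ≤ ·)) (h2 : s2.Pairwise (· ≤ ·)) :
    dmLoop s1 s2 res = fLoop (fun x => (s1.count x : Int)) s2 res := by
  revert h1 h2
  induction s1, s2, res using dmLoop.induct with
  | case1 as b bs res ih =>
      intro h1 h2
      simp only [dmLoop]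
      rw [ih (h1.sublist (by simp)) (h2.sublist (by simp))]
      have hrhs : fLoop (fun x => ((b :: as).count x : Int)) (b :: bs) res
          = fLoop (fun x => if x = b then ((b :: as).count b : Int) - 1
              else ((b :: as).count x : Int)) bs res := by
        rw [fLoop, if_pos (by simp)]
      rw [hrhs]
      exact fLoop_congr _ _ _ _ (fun x _ => by
        by_cases hx : x = b
        · simp [hx, List.count_cons]
        · simp [List.count_cons, hx, Ne.symm hx])
  | case2 a as b bs res hne hlt ih =>
      intro h1 h2
      simp only [dmLoop, if_neg hne, if_pos hlt]
      rw [ih (h1.sublist (by simp)) h2]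
      refine (fLoop_congr _ _ _ _ (fun x hx => ?_)).symm
      have hbx : b ≤ x := by
        rcases List.mem_cons.mp hx with hx | hx
        · simp [hx]
        · exact List.rel_of_pairwise_cons h2 hx
      have hxa : ¬ a = x := by omega
      simp [hxa]
  | case3 a as b bs res hne hlt ih =>
      intro h1 h2
      simp only [dmLoop, if_neg hne, if_neg hlt]
      have hba : b < a := by omega
      have hnotmem : b ∉ a :: as := by
        intro hmem
        rcases List.mem_cons.mp hmem with hm | hm
        · omega
        · have := List.rel_of_pairwise_cons h1 hm; omega
      rw [ih h1 (h2.sublist (by simp))]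
      rw [fLoop]
      rw [if_neg (by simp [List.count_eq_zero.mpr hnotmem])]
  | case4 bs res =>
      intro _ _
      simp [dmLoop, fLoop_of_nonpos]
  | case5 a as res =>
      intro _ _
      simp [dmLoop, fLoop]

-- ===== VERDICT (by name: the statement is the Claim_ definition above) =====
theorem drop_matches_spec : Claim_equal_drop_matches := by
  intro list1 list2 _
  unfold Spec_drop_matches drop_matches drop_matches_alt
  rw [dmAltLoop_eq_fLoop, dmLoop_eq_fLoop _ _ _
    (by simpa using PySem.List.sorted_pairwise list1 (fun x => x))
    (by simpa using PySem.List.sorted_pairwise list2 (fun x => x))]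
  refine fLoop_congr _ _ _ _ (fun x _ => ?_)
  rw [PySem.Dict.getD_foldl_insert_add_one]
  simp
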